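-- pv_equiv track=rewrite | github.com/mmingyu/BOJ | foo_bar_2_2.py | remove_num
-- ===== SOURCE A (Python) =====
-- def remove_num(mods, l, tar, cnt):
--     flag = 0
--     ret = ''
--     for i in range(len(mods) - 1, -1, -1):
--         if flag < cnt and mods[i] == tar:
--             flag += 1
--             continue
--         ret += str(l[i])
--     ret = ret[::-1]
--     if len(ret) == 0: return 0
--     return int(ret)
-- ===== SOURCE B (Python) =====
-- def remove_num(mods, l, tar, cnt):
--     # Pass 1: find the rightmost cnt positions whose mods entry matches tar.
--     skip = set()
--     for i in range(len(mods) - 1, -1, -1):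
--         if len(skip) >= cnt:
--             break
--         if mods[i] == tar:
--             skip.add(i)
--     # Pass 2: rebuild the number from the kept digits, left to right.
--     s = ''.join(str(l[i]) for i in range(len(mods)) if i not in skip)
--     return int(s) if s else 0
-- ===== Notes on version B (the rewrite author's own statement) =====
-- stated objective: alternative
-- what changed: A interleaves the drop-count bookkeeping with one reverse build-then-reverse string loop; B first collects the rightmost cnt matching positions into a set (with an early break) and then rebuilds the number in a single forward join over the kept indices. Pre_ restricts to the task's natural domain (l holds single decimal digits 0-9 at the positions mods indexes, and l is at least as long as mods): outside it A raises (IndexError on short l, ValueError of int() on a kept negative entry) or the digits-to-number reading no longer applies to multi-digit entries.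
-- outside the precondition, e.g. on remove_num([0], [12], 0, 0): A returns 21, B returns 12; on remove_num([1], [-3], 1, 1): A returns 0, B returns 0; on remove_num([1, 1], [5], 1, 1): A returns 5, B returns 5
import Mathlib
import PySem

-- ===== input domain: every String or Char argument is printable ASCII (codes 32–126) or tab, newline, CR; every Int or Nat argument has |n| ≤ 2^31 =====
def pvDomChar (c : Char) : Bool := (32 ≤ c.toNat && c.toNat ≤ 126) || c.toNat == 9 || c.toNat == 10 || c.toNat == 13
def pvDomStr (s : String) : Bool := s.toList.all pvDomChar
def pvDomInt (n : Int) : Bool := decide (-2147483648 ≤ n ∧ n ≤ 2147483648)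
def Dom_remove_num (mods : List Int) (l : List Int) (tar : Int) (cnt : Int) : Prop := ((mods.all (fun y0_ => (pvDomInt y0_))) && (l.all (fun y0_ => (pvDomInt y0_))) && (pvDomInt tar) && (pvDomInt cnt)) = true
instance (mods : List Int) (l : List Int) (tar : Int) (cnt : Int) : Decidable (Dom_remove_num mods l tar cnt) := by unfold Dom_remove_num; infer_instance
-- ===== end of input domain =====

-- B replaces A's single reverse build-then-reverse loop by a collect-the-skipped-positions pass plus a forward rebuild join (alternative decomposition, same cost), on the natural single-digit domain stated in Pre_.


-- ===== PORT A =====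
-- Strings are carried as List Char (PySem.Chars); 'ret = ret[::-1]' is List.reverse
-- (exact per PySem.List.slice?_none_none_neg_one); mods[i] / l[i] use the total
-- pyGetD form, in range under Pre_; 'int(ret)' is (PySem.Int.ofChars? ret).getD 0,
-- exact under Pre_ (the chars are then a nonempty digit string).
def remove_num (mods : List Int) (l : List Int) (tar : Int) (cnt : Int) : Int :=
  let st := (PySem.List.pyRange ((mods.length : Int) - 1) (-1) (-1)).foldl
      (fun (s : Int × List Char) i =>
        if s.1 < cnt ∧ PySem.List.pyGetD mods i 0 = tar then (s.1 + 1, s.2)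
        else (s.1, s.2 ++ PySem.Int.toChars (PySem.List.pyGetD l i 0)))
      ((0 : Int), ([] : List Char))
  let ret := st.2.reverse
  if ret.length = 0 then 0 else (PySem.Int.ofChars? ret).getD 0

-- ===== PORT B =====
-- the first loop of Source B: descending scan with 'break' once len(skip) >= cnt
def altSkipLoop (mods : List Int) (tar : Int) (cnt : Int) : List Int → PySem.Set Int → PySem.Set Int
  | [], skip => skip
  | i :: rest, skip =>
    if cnt ≤ (PySem.Set.len skip : Int) then skip
    else if PySem.List.pyGetD mods i 0 = tar then altSkipLoop mods tar cnt rest (PySem.Set.add skip i)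
    else altSkipLoop mods tar cnt rest skip

def remove_num_alt (mods : List Int) (l : List Int) (tar : Int) (cnt : Int) : Int :=
  let skip := altSkipLoop mods tar cnt (PySem.List.pyRange ((mods.length : Int) - 1) (-1) (-1)) PySem.Set.empty
  -- ''.join(str(l[i]) for i in range(len(mods)) if i not in skip)
  let s := ((PySem.List.pyRange 0 (mods.length : Int) 1).filter
      (fun i => !(PySem.Set.contains skip i))).flatMap
      (fun i => PySem.Int.toChars (PySem.List.pyGetD l i 0))
  if s = [] then 0 else (PySem.Int.ofChars? s).getD 0

-- ===== PRECONDITION & SPEC =====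
-- Pre_ restricts to the task's natural domain — l carries single decimal digits (0..9) at
-- the positions mods indexes, and l is at least as long as mods.  Outside it A raises
-- (IndexError when l is shorter than mods, int() ValueError when a kept entry is negative)
-- or the input is not a digit list, so the digits-to-number reading does not apply
-- (see the cites in claim.json for excluded inputs on which A still returns).
def Pre_remove_num (mods : List Int) (l : List Int) (tar : Int) (cnt : Int) : Prop :=
  mods.length ≤ l.length ∧ ∀ x ∈ l.take mods.length, 0 ≤ x ∧ x ≤ 9
instance (mods : List Int) (l : List Int) (tar : Int) (cnt : Int) : Decidable (Pre_remove_num mods l tar cnt) := by unfold Pre_remove_num; infer_instance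
def pvWitness_remove_num : List Int × List Int × Int × Int := ([1, 2, 1], [3, 4, 5], 1, 1)

def Spec_remove_num (mods : List Int) (l : List Int) (tar : Int) (cnt : Int) (out : Int) : Prop := out = remove_num_alt mods l tar cnt
instance (mods : List Int) (l : List Int) (tar : Int) (cnt : Int) (out : Int) : Decidable (Spec_remove_num mods l tar cnt out) := by unfold Spec_remove_num; infer_instance

-- ===== CLAIM (what is proved, stated in full; the proofs are below) =====
def Claim_equal_remove_num : Prop := ∀ (mods : List Int) (l : List Int) (tar : Int) (cnt : Int), Dom_remove_num mods l tar cnt → Pre_remove_num mods l tar cnt → Spec_remove_num mods l tar cnt (remove_num mods l tar cnt)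

-- ===== LEMMAS AND PROOFS =====

-- 'mods[i] == tar' on a Nat index; A's accumulated chars pvAC and B's collected skip list pvSK
def pvMtch (mods : List Int) (tar : Int) (i : Nat) : Bool := decide (mods.getD i 0 = tar)

def pvAC (mods : List Int) (l : List Int) (tar : Int) (cnt : Int) : List Nat → List Char
  | [] => []
  | i :: rest =>
      if pvMtch mods tar i = true ∧ ((rest.countP (pvMtch mods tar) : Int) < cnt)
      then pvAC mods l tar cnt rest
      else pvAC mods l tar cnt rest ++ PySem.Int.toChars (l.getD i 0)

def pvSK (mods : List Int) (tar : Int) : List Nat → Int → List Int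
  | [], _ => []
  | i :: rest, c =>
      if c ≤ 0 then []
      else if pvMtch mods tar i then (i : Int) :: pvSK mods tar rest (c - 1)
      else pvSK mods tar rest c

theorem pvA_foldr (mods l : List Int) (tar cnt : Int) (xs : List Nat) :
    (List.map (Nat.cast : Nat → Int) xs).foldr
      (fun i s => if s.1 < cnt ∧ PySem.List.pyGetD mods i 0 = tar then (s.1 + 1, s.2)
                  else (s.1, s.2 ++ PySem.Int.toChars (PySem.List.pyGetD l i 0)))
      ((0 : Int), ([] : List Char))
    = (min (max cnt 0) (xs.countP (pvMtch mods tar) : Int), pvAC mods l tar cnt xs) := by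
  induction xs with
  | nil => simp [pvAC]
  | cons i rest ih =>
    rw [List.map_cons, List.foldr_cons, ih]
    have hc : (0:Int) ≤ (rest.countP (pvMtch mods tar) : Int) := by positivity
    set c : Int := (rest.countP (pvMtch mods tar) : Int) with hcdef
    have hiff : (min (max cnt 0) c < cnt) ↔ c < cnt := by
      simp only [min_def, max_def]; split_ifs <;> omega
    simp only [pvAC, pvMtch, List.countP_cons, PySem.List.pyGetD_natCast,
      List.getD_eq_getElem?_getD, ← hcdef]
    by_cases hm : mods[i]?.getD 0 = tar
    · by_cases hlt : c < cnt
      · have h2 : min (max cnt 0) c + 1 = min (max cnt 0) (c + 1) := by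
          simp only [min_def, max_def]; split_ifs <;> omega
        simp [hm, hlt, hiff, h2]
        simp only [min_def, max_def]; split_ifs <;> omega
      · simp [hm, hlt, hiff]
        simp only [min_def, max_def]; split_ifs <;> omega
    · simp [hm]
      rw [← hcdef]

theorem pvAC_reverse (mods l : List Int) (tar cnt : Int) (xs : List Nat) (h : xs.Pairwise (· < ·)) :
    (pvAC mods l tar cnt xs).reverse =
    (xs.filter (fun i => !(pvMtch mods tar i &&
        decide ((xs.countP (fun j => decide (i < j) && pvMtch mods tar j) : Int) < cnt)))).flatMap
      (fun i => (PySem.Int.toChars (l.getD i 0)).reverse) := by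
  induction xs with
  | nil => simp [pvAC]
  | cons i rest ih =>
    have hrest := List.Pairwise.of_cons h
    have hlt : ∀ x ∈ rest, i < x := (List.pairwise_cons.mp h).1
    have hcnt : rest.countP (fun j => decide (i < j) && pvMtch mods tar j)
        = rest.countP (pvMtch mods tar) := by
      apply List.countP_congr
      intro a ha
      simp [hlt a ha]
    have hfc : ∀ a ∈ rest,
        (fun i_1 => !(pvMtch mods tar i_1 &&
          decide ((((i :: rest).countP (fun j => decide (i_1 < j) && pvMtch mods tar j)) : Int) < cnt))) a
        = (fun i_1 => !(pvMtch mods tar i_1 &&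
          decide (((rest.countP (fun j => decide (i_1 < j) && pvMtch mods tar j)) : Int) < cnt))) a := by
      intro a ha
      have : ¬ a < i := by have := hlt a ha; omega
      simp [List.countP_cons, this]
    rw [List.filter_cons, pvAC]
    by_cases hsk : pvMtch mods tar i = true ∧ ((rest.countP (pvMtch mods tar) : Int) < cnt)
    · rw [if_pos hsk]
      have : (!(pvMtch mods tar i &&
          decide ((((i :: rest).countP (fun j => decide (i < j) && pvMtch mods tar j)) : Int) < cnt))) = false := by
        simp [List.countP_cons, hcnt, hsk.1, hsk.2]
      rw [this, ih hrest, List.filter_congr hfc]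
      simp
    · rw [if_neg hsk]
      have : (!(pvMtch mods tar i &&
          decide ((((i :: rest).countP (fun j => decide (i < j) && pvMtch mods tar j)) : Int) < cnt))) = true := by
        rcases Decidable.not_and_iff_not_or_not.mp hsk with h1 | h1
        · simp [h1]
        · simp [List.countP_cons, hcnt, h1]
      rw [this, if_pos rfl]
      simp only [List.reverse_append, List.flatMap_cons]
      rw [ih hrest, List.filter_congr hfc]

theorem pvSkipLoop_eq (mods : List Int) (tar cnt : Int) (ys : List Nat) (s : List Int)
    (h1 : ∀ i ∈ ys, ((i : Int)) ∉ s) (h2 : ys.Nodup) :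
    altSkipLoop mods tar cnt (List.map (Nat.cast : Nat → Int) ys) s
      = s ++ pvSK mods tar ys (cnt - s.length) := by
  induction ys generalizing s with
  | nil => simp [altSkipLoop, pvSK]
  | cons i rest ih =>
    rw [List.map_cons]
    rw [show altSkipLoop mods tar cnt ((i : Int) :: List.map (Nat.cast : Nat → Int) rest) s =
      (if cnt ≤ (PySem.Set.len s : Int) then s
       else if PySem.List.pyGetD mods (i : Int) 0 = tar
       then altSkipLoop mods tar cnt (List.map (Nat.cast : Nat → Int) rest) (PySem.Set.add s (i : Int))
       else altSkipLoop mods tar cnt (List.map (Nat.cast : Nat → Int) rest) s) from rfl]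
    by_cases hb : cnt ≤ (s.length : Int)
    · have : cnt - (s.length : Int) ≤ 0 := by omega
      rw [if_pos (by simpa [PySem.Set.len] using hb)]
      rw [pvSK, if_pos this]
      simp
    · rw [if_neg (by simpa [PySem.Set.len] using hb)]
      have hni : ((i : Int)) ∉ s := h1 i (by simp)
      by_cases hm : mods.getD i 0 = tar
      · rw [if_pos (by simpa using hm)]
        have hadd : PySem.Set.add s (i : Int) = s ++ [(i : Int)] := by
          simp [PySem.Set.add, hni]
        rw [hadd, ih (s ++ [(i : Int)])
          (by intro j hj; simp; have : j ≠ i := by rintro rfl; exact (List.nodup_cons.mp h2).1 hj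
              exact ⟨h1 j (by simp [hj]), by exact_mod_cast this⟩)
          (List.nodup_cons.mp h2).2]
        rw [pvSK, if_neg (by omega), if_pos (by simp [pvMtch, List.getD_eq_getElem?_getD] at hm ⊢; exact hm)]
        simp only [List.append_assoc, List.cons_append, List.nil_append, List.length_append,
          List.length_cons, List.length_nil]
        norm_num [add_comm, sub_sub]
      · rw [if_neg (by simpa using hm)]
        rw [ih s (fun j hj => h1 j (by simp [hj])) (List.nodup_cons.mp h2).2]
        rw [pvSK, if_neg (by omega), if_neg (by simp [pvMtch, List.getD_eq_getElem?_getD] at hm ⊢; exact hm)]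

theorem pvMem_SK (mods : List Int) (tar : Int) (ys : List Nat) (c : Int)
    (h : ys.Pairwise (· > ·)) (j : Nat) :
    ((j : Int) ∈ pvSK mods tar ys c) ↔
      (j ∈ ys ∧ pvMtch mods tar j = true ∧
        ((ys.countP (fun k => decide (j < k) && pvMtch mods tar k) : Int) < c)) := by
  induction ys generalizing c with
  | nil => simp [pvSK]
  | cons i rest ih =>
    have hrest := List.Pairwise.of_cons h
    have hgt : ∀ x ∈ rest, x < i := (List.pairwise_cons.mp h).1
    have hcp : (0:Int) ≤ (rest.countP (fun k => decide (j < k) && pvMtch mods tar k) : Int) := by positivity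
    rw [pvSK]
    by_cases hc : c ≤ 0
    · rw [if_pos hc]
      simp only [List.countP_cons, List.mem_cons]
      constructor
      · intro hx; simp at hx
      · rintro ⟨_, _, hlt⟩
        have h0 : (0:Int) ≤ ((i :: rest).countP (fun k => decide (j < k) && pvMtch mods tar k) : Int) := by positivity
        exact absurd hlt (by omega)
    · rw [if_neg hc]
      by_cases hm : pvMtch mods tar i
      · rw [if_pos hm]
        by_cases hj : j = i
        · subst hj
          have hnr : j ∉ rest := fun hr => absurd (hgt j hr) (lt_irrefl j)
          have hz : (j :: rest).countP (fun k => decide (j < k) && pvMtch mods tar k) = 0 := by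
            rw [List.countP_eq_zero]
            intro a ha
            rcases List.mem_cons.mp ha with rfl | ha'
            · simp
            · simp [Nat.not_lt.mpr (le_of_lt (hgt a ha'))]
          simp [hz, hm]
          omega
        · have hne : ((j : Int)) ≠ (i : Int) := by exact_mod_cast hj
          simp only [List.mem_cons, hne, false_or, List.countP_cons]
          rw [ih (c-1) hrest]
          by_cases hjr : j ∈ rest
          · have hji : j < i := hgt j hjr
            simp [hj, hjr, hji, hm]
            omega
          · simp [hj, hjr]
      · rw [if_neg hm]
        rw [ih c hrest]
        by_cases hj : j = i
        · subst hj
          have hnr : j ∉ rest := fun hr => absurd (hgt j hr) (lt_irrefl j)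
          simp [hnr, hm]
        · simp only [List.mem_cons, hj, false_or, List.countP_cons]
          have : (decide (j < i) && pvMtch mods tar i) = false := by simp [hm]
          simp [this]

-- the descending index list both loops run over
theorem pvDesc (n : Nat) :
    PySem.List.pyRange ((n : Int) - 1) (-1) (-1)
      = (List.map (Nat.cast : Nat → Int) (List.range n)).reverse := by
  rw [PySem.List.pyRange_neg_one_eq_reverse]
  norm_num
  rw [PySem.List.pyRange_zero_nat]

-- a single decimal digit prints as one character, so its string is its own reverse
theorem pvDigitRev (n : Int) (h0 : 0 ≤ n) (h9 : n ≤ 9) :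
    (PySem.Int.toChars n).reverse = PySem.Int.toChars n := by
  interval_cases n <;> decide

theorem pvMain (mods l : List Int) (tar cnt : Int)
    (hlen : mods.length ≤ l.length) (hdig : ∀ x ∈ l.take mods.length, 0 ≤ x ∧ x ≤ 9) :
    remove_num mods l tar cnt = remove_num_alt mods l tar cnt := by
  simp only [remove_num, remove_num_alt, pvDesc, List.foldl_reverse, pvA_foldr]
  rw [pvAC_reverse mods l tar cnt _ (List.pairwise_lt_range)]
  rw [← List.map_reverse]
  rw [pvSkipLoop_eq mods tar cnt _ PySem.Set.empty
    (by intro i _; simp [PySem.Set.empty]) (by simpa using List.nodup_range (n := mods.length))]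
  rw [PySem.List.pyRange_zero_nat]
  rw [List.filter_map, List.flatMap_map]
  simp only [PySem.Set.empty, List.nil_append, List.length_nil, Nat.cast_zero, sub_zero,
    Function.comp_def, PySem.List.pyGetD_natCast]
  have hpred : ∀ i ∈ List.range mods.length,
      (!PySem.Set.contains (pvSK mods tar (List.range mods.length).reverse cnt) ((i : Nat) : Int))
      = (!(pvMtch mods tar i && decide
          (((List.countP (fun j => decide (i < j) && pvMtch mods tar j) (List.range mods.length)) : Int) < cnt))) := by
    intro i hi
    have hin : i < mods.length := List.mem_range.mp hi
    have hmem := pvMem_SK mods tar ((List.range mods.length).reverse) cnt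
      (by rw [List.pairwise_reverse]; exact List.pairwise_lt_range) i
    simp only [List.mem_reverse, List.mem_range, hin, true_and, List.countP_reverse] at hmem
    by_cases hS : ((i : Int)) ∈ pvSK mods tar ((List.range mods.length).reverse) cnt
    · obtain ⟨hm1, hm2⟩ := hmem.mp hS
      simp [hS, hm1, hm2]
    · have := fun h1 h2 => hS (hmem.mpr ⟨h1, h2⟩)
      by_cases hm1 : pvMtch mods tar i = true
      · simp [hS, hm1, Int.not_lt.mp (this hm1)]
      · simp [hS, hm1]
  rw [List.filter_congr hpred]
  -- every kept index holds a single digit, whose one-character string is its own reverse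
  have hblk : ∀ i ∈ (List.range mods.length).filter
      (fun i => !(pvMtch mods tar i && decide
        (((List.countP (fun j => decide (i < j) && pvMtch mods tar j) (List.range mods.length)) : Int) < cnt))),
      (PySem.Int.toChars (l.getD i 0)).reverse = PySem.Int.toChars (l.getD i 0) := by
    intro i hi
    have hin : i < mods.length := List.mem_range.mp (List.mem_of_mem_filter hi)
    have hil : i < l.length := lt_of_lt_of_le hin hlen
    have hmemt : l.getD i 0 ∈ l.take mods.length := by
      have : (l.take mods.length)[i]'(by simp only [List.length_take]; omega) = l[i] := List.getElem_take
      rw [List.getD_eq_getElem l 0 hil, ← this]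
      exact List.getElem_mem _
    obtain ⟨h0, h9⟩ := hdig _ hmemt
    exact pvDigitRev _ h0 h9
  rw [List.flatMap_congr hblk]
  simp only [List.length_eq_zero_iff]

-- ===== VERDICT (by name: the statement is the Claim_ definition above) =====
theorem remove_num_spec : Claim_equal_remove_num := by
  intro mods l tar cnt _ hpre
  exact pvMain mods l tar cnt hpre.1 hpre.2
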